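-- pv_equiv track=rewrite | github.com/saisai/exercises | programming/python/blogs/nedbatchelder_com/pythonic_monotonic.py | mono_runs_pythonic
-- ===== SOURCE A (Python) =====
-- import itertools
--
-- def mono_runs_pythonic(seq):
--
--     class Monotonic:
--         def __init__(self):
--             self._last = float("-inf")
--
--         def __call__(self, curr):
--             res = curr < self._last
--             self._last = curr
--             return res
--
--     return [
--         list(group)[::-1 if is_decreasing else 1]
--         for is_decreasing, group in itertools.groupby(seq, Monotonic())
--     ]
-- ===== SOURCE B (Python) =====
-- def mono_runs_pythonic(seq):
--     seq = list(seq)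
--     n = len(seq)
--     out = []
--     i = 0
--     while i < n:
--         # ascending phase: scan to the end of the maximal non-decreasing run
--         j = i + 1
--         while j < n and seq[j] >= seq[j - 1]:
--             j += 1
--         out.append(seq[i:j])
--         i = j
--         if i < n:
--             # a strictly decreasing run necessarily starts at i now
--             j = i + 1
--             while j < n and seq[j] < seq[j - 1]:
--                 j += 1
--             out.append(seq[i:j][::-1])
--             i = j
--     return out
-- ===== Notes on version B (the rewrite author's own statement) =====
-- stated objective: alternative
-- what changed: Replaces the groupby-on-a-stateful-boolean-key comprehension by an alternating two-phase index scan: each outer step finds the end of the maximal non-decreasing run by index, slices it out, then (if anything remains) scans and slices the strictly decreasing run that must follow, reversing only that slice.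
import Mathlib
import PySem

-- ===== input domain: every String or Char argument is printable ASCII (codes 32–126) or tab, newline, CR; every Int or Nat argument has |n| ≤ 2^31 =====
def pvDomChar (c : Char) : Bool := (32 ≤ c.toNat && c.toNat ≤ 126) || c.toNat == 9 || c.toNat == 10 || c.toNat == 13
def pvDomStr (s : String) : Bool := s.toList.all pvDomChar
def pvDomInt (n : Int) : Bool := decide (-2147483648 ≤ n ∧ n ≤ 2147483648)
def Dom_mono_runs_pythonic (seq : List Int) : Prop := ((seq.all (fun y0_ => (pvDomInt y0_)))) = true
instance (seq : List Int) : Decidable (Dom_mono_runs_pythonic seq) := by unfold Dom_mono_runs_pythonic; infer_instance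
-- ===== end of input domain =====

-- B replaces the groupby+stateful-key comprehension by an alternating two-phase index scan that
-- slices out each maximal non-decreasing run and then the strictly decreasing run that follows
-- (objective: alternative). Return values only; neither program mutates its argument.

-- ===== PORT A =====
-- Monotonic(): key(curr) = curr < last; last starts at float('-inf') (no Int is below it,
-- so the first key is always False) — modeled exactly by 'none' as the initial last.
def pvKeyed : List Int → Option Int → List (Bool × Int)
  | [], _ => []
  | c :: rest, last =>
      ((match last with | none => false | some l => decide (c < l)), c) :: pvKeyed rest (some c)

-- itertools.groupby: streams maximal runs of equal keys; acc holds the current group reversed.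
def pvGroupGo (k : Bool) (acc : List Int) : List (Bool × Int) → List (Bool × List Int)
  | [] => [(k, acc.reverse)]
  | (k', x) :: rest =>
      if k' = k then pvGroupGo k (x :: acc) rest
      else (k, acc.reverse) :: pvGroupGo k' [x] rest

def pvGroupby : List (Bool × Int) → List (Bool × List Int)
  | [] => []
  | (k, x) :: rest => pvGroupGo k [x] rest

-- list(group)[::-1] is exactly List.reverse; [::1] is the identity.
def mono_runs_pythonic (seq : List Int) : List (List Int) :=
  (pvGroupby (pvKeyed seq none)).map
    (fun p => if p.1 then p.2.reverse else p.2)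

-- ===== PORT B =====
-- Inner loop 'j = i + 1; while j < n and seq[j] >= seq[j-1]: j += 1'; j stays ≥ 1 and in
-- range, so every index is in range and getD is exact there.
def pvAscEnd (seq : List Int) (j : Nat) : Nat :=
  if _ : j < seq.length then
    if seq.getD (j - 1) 0 ≤ seq.getD j 0 then pvAscEnd seq (j + 1) else j
  else j
termination_by seq.length - j

-- Inner loop 'j = i + 1; while j < n and seq[j] < seq[j-1]: j += 1' of the descending phase.
def pvDescEnd (seq : List Int) (j : Nat) : Nat :=
  if _ : j < seq.length then
    if seq.getD j 0 < seq.getD (j - 1) 0 then pvDescEnd seq (j + 1) else j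
  else j
termination_by seq.length - j

-- the scan pointers only move right (cited by pvGo's decreasing_by)
theorem pvAscEnd_ge (seq : List Int) (j : Nat) : j ≤ pvAscEnd seq j := by
  fun_induction pvAscEnd seq j with
  | case1 j h hc ih => omega
  | case2 j h hc => omega
  | case3 j h => omega

theorem pvDescEnd_ge (seq : List Int) (j : Nat) : j ≤ pvDescEnd seq j := by
  fun_induction pvDescEnd seq j with
  | case1 j h hc ih => omega
  | case2 j h hc => omega
  | case3 j h => omega

-- outer while loop of Source B; the slice seq[i:j] (0 ≤ i ≤ j) is exactly (seq.drop i).take (j - i),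
-- and seq[i:j][::-1] its reverse.
def pvGo (seq : List Int) (i : Nat) : List (List Int) :=
  if _ : i < seq.length then
    let j := pvAscEnd seq (i + 1)
    if _ : j < seq.length then
      let k := pvDescEnd seq (j + 1)
      ((seq.drop i).take (j - i)) :: ((seq.drop j).take (k - j)).reverse :: pvGo seq k
    else [(seq.drop i).take (j - i)]
  else []
termination_by seq.length - i
decreasing_by
  have h1 := pvAscEnd_ge seq (i + 1)
  have h3 := pvDescEnd_ge seq (pvAscEnd seq (i + 1) + 1)
  omega

def mono_runs_pythonic_alt (seq : List Int) : List (List Int) := pvGo seq 0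

-- ===== PRECONDITION & SPEC =====
def Spec_mono_runs_pythonic (seq : List Int) (out : List (List Int)) : Prop := out = mono_runs_pythonic_alt seq
instance (seq : List Int) (out : List (List Int)) : Decidable (Spec_mono_runs_pythonic seq out) := by unfold Spec_mono_runs_pythonic; infer_instance

-- ===== CLAIM (what is proved, stated in full; the proofs are below) =====
def Claim_equal_mono_runs_pythonic : Prop := ∀ (seq : List Int), Dom_mono_runs_pythonic seq → Spec_mono_runs_pythonic seq (mono_runs_pythonic seq)

-- ===== LEMMAS AND PROOFS =====

-- Reference list-level splitter both ports are reduced to: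
-- maximal non-decreasing run continuing after prev, plus the remainder.
def sAsc (prev : Int) : List Int → List Int × List Int
  | [] => ([], [])
  | x :: xs =>
      if prev ≤ x then
        let (r, rest) := sAsc x xs
        (x :: r, rest)
      else ([], x :: xs)

-- maximal strictly decreasing run after prev, already reversed, plus the remainder.
def sDesc (prev : Int) : List Int → List Int × List Int
  | [] => ([], [])
  | x :: xs =>
      if x < prev then
        let (d, rest) := sDesc x xs
        (d ++ [x], rest)
      else ([], x :: xs)

theorem sAsc_rest_le (prev : Int) (xs : List Int) : (sAsc prev xs).2.length ≤ xs.length := by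
  induction xs generalizing prev with
  | nil => simp [sAsc]
  | cons x xs ih =>
      simp only [sAsc]
      split
      · have := ih x
        cases h : sAsc x xs with
        | mk r rest => simp [h] at this ⊢; omega
      · simp

theorem sDesc_rest_le (prev : Int) (xs : List Int) : (sDesc prev xs).2.length ≤ xs.length := by
  induction xs generalizing prev with
  | nil => simp [sDesc]
  | cons x xs ih =>
      simp only [sDesc]
      split
      · have := ih x
        cases h : sDesc x xs with
        | mk d rest => simp [h] at this ⊢; omega
      · simp

-- reference top level: alternate ascending / descending runs
def sGo : List Int → List (List Int)
  | [] => []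
  | x :: xs =>
      match hA : sAsc x xs with
      | (r, []) => [x :: r]
      | (r, y :: ys) =>
          match hD : sDesc y ys with
          | (d, rest2) => (x :: r) :: (d ++ [y]) :: sGo rest2
termination_by xs => xs.length
decreasing_by
  have h1 := sAsc_rest_le x xs
  have h2 := sDesc_rest_le y ys
  rw [hA] at h1; rw [hD] at h2
  simp only [List.length_cons] at h1 h2 ⊢
  omega

theorem sGo_cons_nil (x : Int) (xs r : List Int) (hA : sAsc x xs = (r, [])) :
    sGo (x :: xs) = [x :: r] := by
  rw [sGo]
  split
  · rename_i r' h
    rw [hA] at h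
    obtain ⟨rfl, -⟩ := Prod.mk.injEq .. ▸ h
    rfl
  · rename_i r' y ys h
    rw [hA] at h
    exact absurd (congrArg Prod.snd h) (by simp)

theorem sGo_cons_cons (x : Int) (xs r : List Int) (y : Int) (ys d rest2 : List Int)
    (hA : sAsc x xs = (r, y :: ys)) (hD : sDesc y ys = (d, rest2)) :
    sGo (x :: xs) = (x :: r) :: (d ++ [y]) :: sGo rest2 := by
  rw [sGo]
  split
  · rename_i r' h
    rw [hA] at h
    exact absurd (congrArg Prod.snd h) (by simp)
  · rename_i r' y' ys' h
    rw [hA] at h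
    obtain ⟨h1, h2, h3⟩ : r = r' ∧ y = y' ∧ ys = ys' := by
      have := h.symm
      simp at this
      tauto
    subst h1; subst h2; subst h3
    rw [hD]

-- ---------- A's groupby stream equals the splitter ----------

theorem groupGo_false (xs : List Int) : ∀ (prev : Int) (acc : List Int),
    pvGroupGo false acc (pvKeyed xs (some prev))
      = match sAsc prev xs with
        | (r, []) => [(false, acc.reverse ++ r)]
        | (r, y :: ys) => (false, acc.reverse ++ r) :: pvGroupGo true [y] (pvKeyed ys (some y)) := by
  induction xs with
  | nil => intro prev acc; simp [pvKeyed, pvGroupGo, sAsc]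
  | cons x xs ih =>
      intro prev acc
      by_cases hx : x < prev
      · simp [pvKeyed, pvGroupGo, sAsc, hx, not_le.mpr hx]
      · have hle : prev ≤ x := not_lt.mp hx
        have hL : pvGroupGo false acc (pvKeyed (x :: xs) (some prev))
            = pvGroupGo false (x :: acc) (pvKeyed xs (some x)) := by
          simp [pvKeyed, pvGroupGo, hx]
        rw [hL, ih x (x :: acc)]
        cases h : sAsc x xs with
        | mk r rest => cases rest <;> simp [sAsc, hle, h]

theorem groupGo_true (xs : List Int) : ∀ (prev : Int) (acc : List Int),
    pvGroupGo true acc (pvKeyed xs (some prev))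
      = match sDesc prev xs with
        | (d, []) => [(true, (d ++ acc).reverse)]
        | (d, y :: ys) => (true, (d ++ acc).reverse) :: pvGroupGo false [y] (pvKeyed ys (some y)) := by
  induction xs with
  | nil => intro prev acc; simp [pvKeyed, pvGroupGo, sDesc]
  | cons x xs ih =>
      intro prev acc
      by_cases hx : x < prev
      · have hL : pvGroupGo true acc (pvKeyed (x :: xs) (some prev))
            = pvGroupGo true (x :: acc) (pvKeyed xs (some x)) := by
          simp [pvKeyed, pvGroupGo, hx]
        rw [hL, ih x (x :: acc)]
        cases h : sDesc x xs with
        | mk d rest => cases rest <;> simp [sDesc, hx, h]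
      · simp [pvKeyed, pvGroupGo, sDesc, hx]

theorem groupGo_false_nil (xs : List Int) (prev : Int) (acc r : List Int)
    (h : sAsc prev xs = (r, [])) :
    pvGroupGo false acc (pvKeyed xs (some prev)) = [(false, acc.reverse ++ r)] := by
  have := groupGo_false xs prev acc
  rw [h] at this
  exact this

theorem groupGo_false_cons (xs : List Int) (prev : Int) (acc r : List Int) (y : Int) (ys : List Int)
    (h : sAsc prev xs = (r, y :: ys)) :
    pvGroupGo false acc (pvKeyed xs (some prev))
      = (false, acc.reverse ++ r) :: pvGroupGo true [y] (pvKeyed ys (some y)) := by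
  have := groupGo_false xs prev acc
  rw [h] at this
  exact this

theorem groupGo_true_nil (xs : List Int) (prev : Int) (acc d : List Int)
    (h : sDesc prev xs = (d, [])) :
    pvGroupGo true acc (pvKeyed xs (some prev)) = [(true, (d ++ acc).reverse)] := by
  have := groupGo_true xs prev acc
  rw [h] at this
  exact this

theorem groupGo_true_cons (xs : List Int) (prev : Int) (acc d : List Int) (y : Int) (ys : List Int)
    (h : sDesc prev xs = (d, y :: ys)) :
    pvGroupGo true acc (pvKeyed xs (some prev))
      = (true, (d ++ acc).reverse) :: pvGroupGo false [y] (pvKeyed ys (some y)) := by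
  have := groupGo_true xs prev acc
  rw [h] at this
  exact this

theorem a_eq_sGo_cons (n : Nat) (xs : List Int) (hn : xs.length = n) (x : Int) :
    (pvGroupGo false [x] (pvKeyed xs (some x))).map (fun p => if p.1 then p.2.reverse else p.2)
      = sGo (x :: xs) := by
  induction n using Nat.strong_induction_on generalizing xs x with
  | _ n ih =>
      cases hA : sAsc x xs with
      | mk r rest =>
          cases rest with
          | nil =>
              rw [groupGo_false_nil xs x [x] r hA, sGo_cons_nil x xs r hA]
              simp
          | cons y ys =>
              have hy : ys.length + 1 ≤ xs.length := by
                have := sAsc_rest_le x xs; rw [hA] at this; simpa using this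
              rw [groupGo_false_cons xs x [x] r y ys hA]
              cases hD : sDesc y ys with
              | mk d rest2 =>
                  cases rest2 with
                  | nil =>
                      rw [sGo_cons_cons x xs r y ys d [] hA hD, groupGo_true_nil ys y [y] d hD]
                      simp [sGo]
                  | cons z zs =>
                      have hz : zs.length + 1 ≤ ys.length := by
                        have := sDesc_rest_le y ys; rw [hD] at this; simpa using this
                      rw [sGo_cons_cons x xs r y ys d (z :: zs) hA hD,
                        groupGo_true_cons ys y [y] d z zs hD]
                      have := ih zs.length (by omega) zs rfl z
                      simp [this]

-- ---------- B's index scans equal the splitter ----------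

theorem ascBridge (seq : List Int) (j : Nat) (hj : 1 ≤ j) :
    sAsc (seq.getD (j - 1) 0) (seq.drop j)
      = ((seq.drop j).take (pvAscEnd seq j - j), seq.drop (pvAscEnd seq j)) := by
  fun_induction pvAscEnd seq j with
  | case1 j h hc ih =>
      have hdrop : seq.drop j = seq[j] :: seq.drop (j + 1) := List.drop_eq_getElem_cons h
      have hgd : seq.getD j 0 = seq[j] := List.getD_eq_getElem seq 0 h
      have hE := pvAscEnd_ge seq (j + 1)
      rw [hdrop]
      have hc' : seq.getD (j - 1) 0 ≤ seq[j] := by rw [← hgd]; exact hc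
      simp only [sAsc, if_pos hc']
      have ih' := ih (by omega)
      simp only [Nat.add_sub_cancel] at ih'
      rw [hgd] at ih'
      rw [ih']
      obtain ⟨m, hm⟩ : ∃ m, pvAscEnd seq (j + 1) - j = m + 1 := ⟨pvAscEnd seq (j + 1) - (j + 1), by omega⟩
      rw [hm, List.take_succ_cons]
      have : pvAscEnd seq (j + 1) - (j + 1) = m := by omega
      rw [this]
  | case2 j h hc =>
      have hdrop : seq.drop j = seq[j] :: seq.drop (j + 1) := List.drop_eq_getElem_cons h
      have hgd : seq.getD j 0 = seq[j] := List.getD_eq_getElem seq 0 h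
      have hc' : ¬ seq.getD (j - 1) 0 ≤ seq[j] := by rw [← hgd]; exact hc
      rw [hdrop, Nat.sub_self]
      simp only [sAsc, List.take_zero]
      rw [if_neg hc']
  | case3 j h =>
      have hdrop : seq.drop j = [] := List.drop_eq_nil_of_le (by omega)
      simp [hdrop, sAsc]

theorem descBridge (seq : List Int) (j : Nat) (hj : 1 ≤ j) :
    sDesc (seq.getD (j - 1) 0) (seq.drop j)
      = (((seq.drop j).take (pvDescEnd seq j - j)).reverse, seq.drop (pvDescEnd seq j)) := by
  fun_induction pvDescEnd seq j with
  | case1 j h hc ih =>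
      have hdrop : seq.drop j = seq[j] :: seq.drop (j + 1) := List.drop_eq_getElem_cons h
      have hgd : seq.getD j 0 = seq[j] := List.getD_eq_getElem seq 0 h
      have hE := pvDescEnd_ge seq (j + 1)
      rw [hdrop]
      have hc' : seq[j] < seq.getD (j - 1) 0 := by rw [← hgd]; exact hc
      simp only [sDesc, if_pos hc']
      have ih' := ih (by omega)
      simp only [Nat.add_sub_cancel] at ih'
      rw [hgd] at ih'
      rw [ih']
      obtain ⟨m, hm⟩ : ∃ m, pvDescEnd seq (j + 1) - j = m + 1 := ⟨pvDescEnd seq (j + 1) - (j + 1), by omega⟩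
      rw [hm, List.take_succ_cons, List.reverse_cons]
      have : pvDescEnd seq (j + 1) - (j + 1) = m := by omega
      rw [this]
  | case2 j h hc =>
      have hdrop : seq.drop j = seq[j] :: seq.drop (j + 1) := List.drop_eq_getElem_cons h
      have hgd : seq.getD j 0 = seq[j] := List.getD_eq_getElem seq 0 h
      have hc' : ¬ seq[j] < seq.getD (j - 1) 0 := by rw [← hgd]; exact hc
      rw [hdrop, Nat.sub_self]
      simp only [sDesc, List.take_zero, List.reverse_nil]
      rw [if_neg hc']
  | case3 j h =>
      have hdrop : seq.drop j = [] := List.drop_eq_nil_of_le (by omega)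
      simp [hdrop, sDesc]

theorem goBridge (seq : List Int) (i : Nat) : pvGo seq i = sGo (seq.drop i) := by
  fun_induction pvGo seq i with
  | case1 i h j h2 k ih =>
      have hdropi : seq.drop i = seq[i] :: seq.drop (i + 1) := List.drop_eq_getElem_cons h
      have hji := pvAscEnd_ge seq (i + 1)
      have hkj := pvDescEnd_ge seq (j + 1)
      have hA := ascBridge seq (i + 1) (by omega)
      simp only [Nat.add_sub_cancel] at hA
      rw [List.getD_eq_getElem seq 0 h] at hA
      have hdropj : seq.drop j = seq[j] :: seq.drop (j + 1) := List.drop_eq_getElem_cons h2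
      have hD := descBridge seq (j + 1) (by omega)
      simp only [Nat.add_sub_cancel] at hD
      rw [List.getD_eq_getElem seq 0 h2] at hD
      rw [hdropj] at hA
      conv_rhs => rw [hdropi]
      rw [sGo_cons_cons _ _ _ _ _ _ _ hA hD, ih]
      -- match the three components
      have hrun : (seq.drop i).take (j - i) = seq[i] :: (seq.drop (i + 1)).take (j - (i + 1)) := by
        rw [hdropi]
        obtain ⟨m, hm⟩ : ∃ m, j - i = m + 1 := ⟨j - (i + 1), by omega⟩
        rw [hm, List.take_succ_cons]
        have : j - (i + 1) = m := by omega
        rw [this]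
      have hdesc : ((seq.drop j).take (k - j)).reverse
          = ((seq.drop (j + 1)).take (k - (j + 1))).reverse ++ [seq[j]] := by
        rw [hdropj]
        obtain ⟨m, hm⟩ : ∃ m, k - j = m + 1 := ⟨k - (j + 1), by omega⟩
        rw [hm, List.take_succ_cons, List.reverse_cons]
        have : k - (j + 1) = m := by omega
        rw [this]
      rw [hrun, hdesc]
  | case2 i h j h2 =>
      have hdropi : seq.drop i = seq[i] :: seq.drop (i + 1) := List.drop_eq_getElem_cons h
      have hji := pvAscEnd_ge seq (i + 1)
      have hA := ascBridge seq (i + 1) (by omega)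
      simp only [Nat.add_sub_cancel] at hA
      rw [List.getD_eq_getElem seq 0 h] at hA
      have hdropj : seq.drop j = [] := List.drop_eq_nil_of_le (by omega)
      rw [hdropj] at hA
      conv_rhs => rw [hdropi]
      rw [sGo_cons_nil _ _ _ hA]
      have hrun : (seq.drop i).take (j - i) = seq[i] :: (seq.drop (i + 1)).take (j - (i + 1)) := by
        rw [hdropi]
        obtain ⟨m, hm⟩ : ∃ m, j - i = m + 1 := ⟨j - (i + 1), by omega⟩
        rw [hm, List.take_succ_cons]
        have : j - (i + 1) = m := by omega
        rw [this]
      rw [hrun]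
  | case3 i h =>
      have hdropi : seq.drop i = [] := List.drop_eq_nil_of_le (by omega)
      rw [hdropi]
      simp [sGo]

-- ===== VERDICT (by name: the statement is the Claim_ definition above) =====
theorem mono_runs_pythonic_spec : Claim_equal_mono_runs_pythonic := by
  intro seq _
  unfold Spec_mono_runs_pythonic
  show mono_runs_pythonic seq = mono_runs_pythonic_alt seq
  have hB : mono_runs_pythonic_alt seq = sGo seq := by
    unfold mono_runs_pythonic_alt
    rw [goBridge seq 0, List.drop_zero]
  rw [hB]
  cases seq with
  | nil => simp [mono_runs_pythonic, pvKeyed, pvGroupby, sGo]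
  | cons x xs =>
      unfold mono_runs_pythonic
      have hkey : pvKeyed (x :: xs) none = (false, x) :: pvKeyed xs (some x) := by
        simp [pvKeyed]
      rw [hkey]
      show (pvGroupGo false [x] (pvKeyed xs (some x))).map (fun p => if p.1 then p.2.reverse else p.2)
          = sGo (x :: xs)
      exact a_eq_sGo_cons xs.length xs rfl x
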